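-- pv_equiv track=rewrite | github.com/Himikid/andalus-taraweeh | scripts/ai_pipeline/regression_harness.py | _longest_inferred_run
-- ===== SOURCE A (Python) =====
-- def _longest_inferred_run(markers: list[dict]) -> int:
--     ordered = sorted(markers, key=lambda item: (int(item.get("surah_number") or 0), int(item.get("ayah") or 0)))
--     longest = 0
--     current = 0
--     for marker in ordered:
--         if str(marker.get("quality", "")).lower() == "inferred":
--             current += 1
--             if current > longest:
--                 longest = current
--         else:
--             current = 0
--     return longest
-- ===== SOURCE B (Python) =====
-- def _longest_inferred_run(markers: list[dict]) -> int:
--     ordered = sorted(markers, key=lambda item: (int(item.get("surah_number") or 0), int(item.get("ayah") or 0)))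
--     flags = [str(m.get("quality", "")).lower() == "inferred" for m in ordered]
--     runs = []
--     i = 0
--     n = len(flags)
--     while i < n:
--         j = i
--         while j < n and flags[j] == flags[i]:
--             j += 1
--         if flags[i]:
--             runs.append(j - i)
--         i = j
--     return max(runs, default=0)
-- ===== Notes on version B (the rewrite author's own statement) =====
-- stated objective: alternative
-- what changed: B replaces A's running-counter/longest fold with a groupby-style segmentation: it maps the sorted markers to a list of 'is inferred' flags, cuts it into maximal equal runs with a two-pointer scan, collects the lengths of the True runs, and returns their max (default 0).
import Mathlib
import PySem

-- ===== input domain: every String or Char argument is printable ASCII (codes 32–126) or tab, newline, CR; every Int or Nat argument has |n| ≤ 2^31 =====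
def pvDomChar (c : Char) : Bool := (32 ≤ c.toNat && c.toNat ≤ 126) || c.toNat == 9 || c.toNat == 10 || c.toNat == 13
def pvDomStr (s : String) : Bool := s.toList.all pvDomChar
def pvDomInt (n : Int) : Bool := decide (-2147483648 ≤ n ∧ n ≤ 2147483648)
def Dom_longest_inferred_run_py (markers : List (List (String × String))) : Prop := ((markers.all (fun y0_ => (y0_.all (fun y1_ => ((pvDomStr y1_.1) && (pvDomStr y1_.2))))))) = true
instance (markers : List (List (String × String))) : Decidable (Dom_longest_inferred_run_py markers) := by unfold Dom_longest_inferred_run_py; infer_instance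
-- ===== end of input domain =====

-- B replaces A's running-counter fold by a groupby-style segmentation: it first maps
-- each sorted marker to a Bool flag, cuts the flag list into maximal equal runs, keeps
-- the lengths of the 'inferred' runs, and returns their max (default 0). objective: alternative.

-- ===== PORT A =====
-- int(item.get(k) or 0): None/'' -> 0, else int(s). Outside Pre_ Python raises ValueError;
-- the .getD 0 below is only reached outside Pre_.
def pvKeyInt (m : List (String × String)) (k : String) : Int :=
  match (PySem.Dict.mk m).get? k with
  | none => 0
  | some s => if s = "" then 0 else (PySem.Int.ofStr? s).getD 0

-- ordered = sorted(markers, key=lambda item: (int(...), int(...)))  (shared verbatim by A and B)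
def pvOrdered (markers : List (List (String × String))) : List (List (String × String)) :=
  PySem.List.sorted2 markers (fun m => pvKeyInt m "surah_number") (fun m => pvKeyInt m "ayah")

-- str(marker.get("quality", "")).lower() == "inferred"
def pvFlag (m : List (String × String)) : Bool :=
  PySem.Str.lower ((PySem.Dict.mk m).getD "quality" "") == "inferred"

def longest_inferred_run_py (markers : List (List (String × String))) : Int :=
  ((pvOrdered markers).foldl
    (fun (st : Int × Int) marker =>
      if pvFlag marker then
        let current := st.2 + 1
        (if current > st.1 then current else st.1, current)
      else (st.1, 0))
    (0, 0)).1

-- ===== PORT B =====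
-- the two-pointer while loop of Source B: cut the flag list into maximal equal runs,
-- keep the lengths of the True runs (inner while = takeWhile/dropWhile of the run)
def pvSegs : List Bool → List Int
  | [] => []
  | b :: rest =>
      let t := rest.takeWhile (fun c => c == b)
      let rest' := rest.dropWhile (fun c => c == b)
      if b then ((1 + t.length : Int)) :: pvSegs rest' else pvSegs rest'
termination_by l => l.length
decreasing_by
  all_goals
    have := (List.dropWhile_sublist (p := fun c => c == b) (l := rest)).length_le
    simp only [List.length_cons]
    omega

def longest_inferred_run_py_alt (markers : List (List (String × String))) : Int :=
  (PySem.List.max? (pvSegs ((pvOrdered markers).map pvFlag)) (fun x => x)).getD 0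

-- ===== PRECONDITION & SPEC =====
-- Pre_ excludes exactly the inputs where Python's int() raises ValueError in the sort key:
-- a marker whose "surah_number" or "ayah" value is a non-empty string that is not a valid int literal.
def Pre_longest_inferred_run_py (markers : List (List (String × String))) : Prop :=
  ∀ m ∈ markers, ∀ k ∈ ["surah_number", "ayah"],
    (((PySem.Dict.mk m).get? k).all (fun s => s == "" || (PySem.Int.ofStr? s).isSome)) = true
instance (markers : List (List (String × String))) : Decidable (Pre_longest_inferred_run_py markers) := by
  unfold Pre_longest_inferred_run_py; infer_instance
def pvWitness_longest_inferred_run_py : (List (List (String × String))) :=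
  [[("surah_number", "1"), ("ayah", "2"), ("quality", "inferred")],
   [("surah_number", "1"), ("ayah", ""), ("quality", "good")]]
def Spec_longest_inferred_run_py (markers : List (List (String × String))) (out : Int) : Prop := out = longest_inferred_run_py_alt markers
instance (markers : List (List (String × String))) (out : Int) : Decidable (Spec_longest_inferred_run_py markers out) := by unfold Spec_longest_inferred_run_py; infer_instance

-- ===== CLAIM (what is proved, stated in full; the proofs are below) =====
def Claim_equal_longest_inferred_run_py : Prop := ∀ (markers : List (List (String × String))), Dom_longest_inferred_run_py markers → Pre_longest_inferred_run_py markers → Spec_longest_inferred_run_py markers (longest_inferred_run_py markers)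

-- ===== LEMMAS AND PROOFS =====

-- A's loop body, on the Bool flag alone
def pvStep (st : Int × Int) (b : Bool) : Int × Int :=
  if b then
    let current := st.2 + 1
    (if current > st.1 then current else st.1, current)
  else (st.1, 0)

theorem pvStep_true (L c : Int) : pvStep (L, c) true = (max L (c + 1), c + 1) := by
  show (if c + 1 > L then c + 1 else L, c + 1) = _
  by_cases h : c + 1 > L
  · rw [if_pos h, max_eq_right (by omega)]
  · rw [if_neg h, max_eq_left (by omega)]

theorem pvStep_false (L c : Int) : pvStep (L, c) false = (L, 0) := rfl

theorem pvFoldl_replicate_true (n : Nat) : ∀ (L c : Int) (tl : List Bool), 0 ≤ c → c ≤ L →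
    (List.replicate n true ++ tl).foldl pvStep (L, c) = tl.foldl pvStep (max L (c + n), c + n) := by
  induction n with
  | zero => intro L c tl h0 hc; simp; rw [max_eq_left (by omega)]
  | succ n ih =>
      intro L c tl h0 hc
      rw [List.replicate_succ, List.cons_append, List.foldl_cons, pvStep_true]
      rw [ih (max L (c + 1)) (c + 1) tl (by omega) (le_max_right _ _)]
      have h1 : max (max L (c + 1)) (c + 1 + n) = max L (c + (n + 1 : Nat)) := by
        push_cast; omega
      have h2 : (c + 1 + n : Int) = c + (n + 1 : Nat) := by push_cast; omega
      rw [h1, h2]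

theorem pvFoldl_replicate_false (n : Nat) : ∀ (L : Int) (tl : List Bool),
    (List.replicate n false ++ tl).foldl pvStep (L, 0) = tl.foldl pvStep (L, 0) := by
  induction n with
  | zero => intro L tl; simp
  | succ n ih =>
      intro L tl
      rw [List.replicate_succ, List.cons_append, List.foldl_cons, pvStep_false]
      exact ih L tl

theorem pvFoldl_max_max (l : List Int) : ∀ a b : Int, l.foldl max (max a b) = max a (l.foldl max b) := by
  induction l with
  | nil => intro a b; simp
  | cons x t ih =>
      intro a b
      simp only [List.foldl_cons]
      rw [max_assoc, ih]

theorem pvDropWhile_head_ne (b : Bool) : ∀ (l : List Bool) (c : Bool) (r : List Bool),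
    l.dropWhile (fun x => x == b) = c :: r → c ≠ b := by
  intro l
  induction l with
  | nil => intro c r h; simp [List.dropWhile] at h
  | cons x xs ih =>
      intro c r h
      by_cases hx : x = b
      · rw [List.dropWhile_cons_of_pos (by simp [hx])] at h
        exact ih c r h
      · rw [List.dropWhile_cons_of_neg (by simp [hx])] at h
        obtain ⟨rfl, -⟩ := List.cons.injEq .. ▸ h
        exact hx

theorem pvTakeWhile_replicate (b : Bool) (l : List Bool) :
    l.takeWhile (fun c => c == b) = List.replicate (l.takeWhile (fun c => c == b)).length b := by
  rw [List.eq_replicate_iff]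
  refine ⟨rfl, ?_⟩
  intro x hx
  have := List.mem_takeWhile_imp hx
  simpa using this

theorem pvSegs_pos : ∀ (fl : List Bool), ∀ x ∈ pvSegs fl, 1 ≤ x := by
  intro fl
  induction fl using pvSegs.induct with
  | case1 => intro x hx; simp [pvSegs] at hx
  | case2 rest _ ih =>
      intro x hx
      rw [pvSegs] at hx
      simp only [if_pos] at hx
      rcases List.mem_cons.mp hx with h | h
      · subst h
        have : (0:Int) ≤ ((rest.takeWhile (fun c => c == true)).length : Int) := Int.natCast_nonneg _
        omega
      · exact ih x h
  | case3 b rest _ hb ih =>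
      intro x hx
      have hb' : b = false := by revert hb; cases b <;> simp
      subst hb'
      rw [pvSegs] at hx
      simp only [Bool.false_eq_true, if_false] at hx
      exact ih x hx

theorem pvMain : ∀ (fl : List Bool) (L : Int), 0 ≤ L →
    (fl.foldl pvStep (L, 0)).1 = max L ((pvSegs fl).foldl max 0) := by
  intro fl
  induction fl using pvSegs.induct with
  | case1 => intro L hL; simp [pvSegs]; omega
  | case2 rest _ ih =>
      intro L hL
      have hdecomp : (true : Bool) :: rest
          = List.replicate (1 + (rest.takeWhile (fun c => c == true)).length) true
            ++ rest.dropWhile (fun c => c == true) := by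
        rw [Nat.add_comm, List.replicate_succ, List.cons_append,
            ← pvTakeWhile_replicate, List.takeWhile_append_dropWhile]
      have hseg : pvSegs (true :: rest)
          = ((1 + ((rest.takeWhile (fun c => c == true)).length : Int))
            :: pvSegs (rest.dropWhile (fun c => c == true))) := by
        rw [pvSegs]
        simp
      have hL1 : ((true :: rest).foldl pvStep (L, 0))
          = (rest.dropWhile (fun c => c == true)).foldl pvStep
              (max L (0 + ((1 + (rest.takeWhile (fun c => c == true)).length : Nat) : Int)),
               0 + ((1 + (rest.takeWhile (fun c => c == true)).length : Nat) : Int)) := by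
        conv_lhs => rw [hdecomp]
        exact pvFoldl_replicate_true _ L 0 _ le_rfl hL
      rw [hL1, hseg]
      rcases hrest' : rest.dropWhile (fun c => c == true) with _ | ⟨c, r⟩
      · simp only [List.foldl_nil, List.foldl_cons, pvSegs]
        push_cast
        omega
      · have hc : c = false := by
          have := pvDropWhile_head_ne true rest c r hrest'
          revert this; cases c <;> simp
        subst hc
        have ih2 : ∀ (M : Int), 0 ≤ M →
            ((rest.dropWhile (fun c => c == true)).foldl pvStep (M, 0)).1
              = max M ((pvSegs (rest.dropWhile (fun c => c == true))).foldl max 0) := ih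
        have hih := ih2 (max L (0 + ((1 + (rest.takeWhile (fun c => c == true)).length : Nat) : Int)))
          (le_max_of_le_left hL)
        rw [hrest'] at hih
        rw [List.foldl_cons, pvStep_false] at hih
        rw [List.foldl_cons, pvStep_false, hih, List.foldl_cons,
            max_comm (0:Int) (1 + ((rest.takeWhile (fun c => c == true)).length : Int)),
            pvFoldl_max_max]
        push_cast
        omega
  | case3 b rest _ hb ih =>
      intro L hL
      have hb' : b = false := by revert hb; cases b <;> simp
      subst hb'
      have hdecomp : (false : Bool) :: rest
          = List.replicate (1 + (rest.takeWhile (fun c => c == false)).length) false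
            ++ rest.dropWhile (fun c => c == false) := by
        rw [Nat.add_comm, List.replicate_succ, List.cons_append,
            ← pvTakeWhile_replicate, List.takeWhile_append_dropWhile]
      have hseg : pvSegs (false :: rest) = pvSegs (rest.dropWhile (fun c => c == false)) := by
        rw [pvSegs]
        simp
      conv_lhs => rw [hdecomp]
      rw [pvFoldl_replicate_false, hseg]
      exact ih L hL


theorem pvMaxD (l : List Int) (h : ∀ x ∈ l, 0 ≤ x) :
    (PySem.List.max? l (fun x => x)).getD 0 = l.foldl max 0 := by
  cases l with
  | nil => simp [PySem.List.max?]
  | cons x t =>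
      rw [PySem.List.max?_id_cons]
      simp only [Option.getD_some, List.foldl_cons]
      have hx : (0:Int) ≤ x := h x (by simp)
      have e1 : t.foldl max x = max x (t.foldl max 0) := by
        conv_lhs => rw [← max_eq_left hx]
        exact pvFoldl_max_max t x 0
      rw [e1, max_comm (0:Int) x, pvFoldl_max_max t x 0]

-- ===== VERDICT (by name: the statement is the Claim_ definition above) =====
theorem longest_inferred_run_py_spec : Claim_equal_longest_inferred_run_py := by
  unfold Claim_equal_longest_inferred_run_py
  intro markers _ _
  unfold Spec_longest_inferred_run_py
  have key : (((pvOrdered markers).map pvFlag).foldl pvStep ((0:Int), (0:Int))).1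
      = longest_inferred_run_py markers := by
    rw [List.foldl_map]; rfl
  rw [← key, pvMain _ 0 le_rfl]
  have h0 : (0:Int) ≤ (pvSegs ((pvOrdered markers).map pvFlag)).foldl max 0 :=
    (PySem.List.le_foldl_max _ _).1
  rw [max_eq_right h0]
  unfold longest_inferred_run_py_alt
  rw [pvMaxD _ (fun x hx => le_trans (by norm_num) (pvSegs_pos _ x hx))]
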